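-- pv_equiv track=rewrite | github.com/P-Mithil/AriseFinal | minor_timetable.py | schedule_courses_for_semester
-- ===== SOURCE A (Python) =====
-- from collections import defaultdict
-- from typing import Dict, List, Tuple
--
-- DAYS: List[str] = ["Mon", "Tue", "Wed", "Thu", "Fri"]
--
-- TIME_SLOTS: List[str] = ["7:30-9:00", "18:00-19:30"]
--
-- def schedule_courses_for_semester(courses: List[str]) -> Dict[Tuple[str, str], List[str]]:
--     """
--     Schedule courses for a single semester.
--
--     Rules:
--     - Each course gets exactly 2 slots.
--     - Slots must be on different days.
--     - Slots must be in the same time band (both morning or both evening).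
--     - Slots may be shared if needed.
--
--     Returns:
--         Dict[(day, time_slot)] -> List[course_names]
--     """
--     grid: Dict[Tuple[str, str], List[str]] = defaultdict(list)
--
--     if not courses:
--         return grid
--
--     # Round-robin pointers per time band
--     morning_pointer = 0  # for TIME_SLOTS[0]
--     evening_pointer = 0  # for TIME_SLOTS[1]
--
--     for idx, course in enumerate(courses):
--         # Alternate bands for some balance: odd -> morning, even -> evening
--         use_morning = (idx % 2 == 0)
--         if use_morning:
--             band_slot = TIME_SLOTS[0]
--             base_pointer = morning_pointer
--         else:
--             band_slot = TIME_SLOTS[1]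
--             base_pointer = evening_pointer
--
--         # First day
--         day1_idx = base_pointer % len(DAYS)
--         day1 = DAYS[day1_idx]
--
--         # Second day: shift by 2 days for better spread, but ensure different day
--         day2_idx = (base_pointer + 2) % len(DAYS)
--         if day2_idx == day1_idx:
--             day2_idx = (day1_idx + 1) % len(DAYS)
--         day2 = DAYS[day2_idx]
--
--         grid[(day1, band_slot)].append(course)
--         grid[(day2, band_slot)].append(course)
--
--         # Advance pointer for this band
--         if use_morning:
--             morning_pointer += 1
--         else:
--             evening_pointer += 1
--
--     return grid
-- ===== SOURCE B (Python) =====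
-- from collections import defaultdict
-- from typing import Dict, List, Tuple
--
-- DAYS: List[str] = ["Mon", "Tue", "Wed", "Thu", "Fri"]
-- TIME_SLOTS: List[str] = ["7:30-9:00", "18:00-19:30"]
--
-- def _keys_of(i: int) -> List[Tuple[str, str]]:
--     # The two (day, slot) cells course number i occupies: band by parity,
--     # round-robin position i // 2 within the band, days 2 apart.
--     slot = TIME_SLOTS[i % 2]
--     p = i // 2
--     return [(DAYS[p % 5], slot), (DAYS[(p + 2) % 5], slot)]
--
-- def schedule_courses_for_semester(courses: List[str]) -> Dict[Tuple[str, str], List[str]]: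
--     # Gather (key-driven) instead of scatter (course-driven): first list the
--     # occupied cells in first-use order, then fill each cell by one filter
--     # over the courses.  No per-course appends into the grid.
--     grid: Dict[Tuple[str, str], List[str]] = defaultdict(list)
--     if not courses:
--         return grid
--     ordered: List[Tuple[str, str]] = []
--     for i in range(len(courses)):
--         for k in _keys_of(i):
--             if k not in ordered:
--                 ordered.append(k)
--     for k in ordered:
--         grid[k] = [c for i, c in enumerate(courses) if k in _keys_of(i)]
--     return grid
-- ===== Notes on version B (the rewrite author's own statement) =====
-- stated objective: alternative
-- what changed: Inverts the construction from scatter to gather: instead of one stateful course loop appending each course into the grid via two running band pointers (with a dead day-collision branch), B first computes the list of occupied (day, slot) cells in first-use order and then fills each cell independently by a single membership filter over the enumerated courses; the grid sees one assignment per cell, never a per-course append.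
import Mathlib
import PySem

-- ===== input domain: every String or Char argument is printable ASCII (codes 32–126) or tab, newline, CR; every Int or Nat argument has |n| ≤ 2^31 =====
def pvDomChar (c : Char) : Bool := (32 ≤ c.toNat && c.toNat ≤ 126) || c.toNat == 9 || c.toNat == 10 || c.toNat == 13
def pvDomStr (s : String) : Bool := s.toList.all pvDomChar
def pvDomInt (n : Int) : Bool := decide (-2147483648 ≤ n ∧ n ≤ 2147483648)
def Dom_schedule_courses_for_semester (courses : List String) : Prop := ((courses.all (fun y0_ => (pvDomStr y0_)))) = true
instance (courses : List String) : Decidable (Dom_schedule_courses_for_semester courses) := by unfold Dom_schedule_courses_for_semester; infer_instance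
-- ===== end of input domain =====

-- B inverts A's construction: instead of scattering each course into the grid with two
-- running band pointers, it lists the occupied cells in first-use order and then fills
-- each cell by one filter over the courses (key-driven gather); same value, same O(n) cost.

-- ===== PORT A =====
def pvDAYS : List String := ["Mon", "Tue", "Wed", "Thu", "Fri"]
def pvTIME_SLOTS : List String := ["7:30-9:00", "18:00-19:30"]

-- one iteration of A's loop body; state = (grid, morning_pointer, evening_pointer)
def pvStepA (st : PySem.Dict (String × String) (List String) × Int × Int) (p : Int × String) :
    PySem.Dict (String × String) (List String) × Int × Int :=
  let grid := st.1
  let mp := st.2.1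
  let ep := st.2.2
  let idx := p.1
  let course := p.2
  let use_morning := PySem.Int.mod idx 2 == 0
  let band_slot := if use_morning then PySem.List.pyGetD pvTIME_SLOTS 0 "" else PySem.List.pyGetD pvTIME_SLOTS 1 ""
  let base_pointer := if use_morning then mp else ep
  let day1_idx := PySem.Int.mod base_pointer 5
  let day1 := PySem.List.pyGetD pvDAYS day1_idx ""
  let day2_idx0 := PySem.Int.mod (base_pointer + 2) 5
  let day2_idx := if day2_idx0 = day1_idx then PySem.Int.mod (day1_idx + 1) 5 else day2_idx0
  let day2 := PySem.List.pyGetD pvDAYS day2_idx ""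
  let grid := grid.modify (day1, band_slot) [] (· ++ [course])
  let grid := grid.modify (day2, band_slot) [] (· ++ [course])
  if use_morning then (grid, mp + 1, ep) else (grid, mp, ep + 1)

def schedule_courses_for_semester (courses : List String) : List (String × String × List String) :=
  if courses = [] then []
  else
    let st := (PySem.List.enumerate courses 0).foldl pvStepA (PySem.Dict.empty, 0, 0)
    st.1.items.map (fun p => (p.1.1, p.1.2, p.2))

-- ===== PORT B =====
-- _keys_of(i): the two (day, slot) cells course number i occupies
def pvKeysOf (i : Int) : List (String × String) :=
  let slot := PySem.List.pyGetD pvTIME_SLOTS (PySem.Int.mod i 2) ""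
  let p := PySem.Int.floordiv i 2
  [(PySem.List.pyGetD pvDAYS (PySem.Int.mod p 5) "", slot),
   (PySem.List.pyGetD pvDAYS (PySem.Int.mod (p + 2) 5) "", slot)]

def schedule_courses_for_semester_alt (courses : List String) : List (String × String × List String) :=
  if courses = [] then []
  else
    -- occupied cells, first-use order ('if k not in ordered: ordered.append(k)' = Set.add)
    let ordered : PySem.Set (String × String) :=
      (PySem.List.pyRange 0 (courses.length : Int) 1).foldl
        (fun s i => (pvKeysOf i).foldl PySem.Set.add s) PySem.Set.empty
    -- gather: fill each cell by one filter over the enumerated courses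
    let grid : PySem.Dict (String × String) (List String) :=
      ordered.foldl
        (fun d k => d.insert k (((PySem.List.enumerate courses 0).filter
          (fun p => (pvKeysOf p.1).contains k)).map (·.2)))
        PySem.Dict.empty
    grid.items.map (fun p => (p.1.1, p.1.2, p.2))

-- ===== PRECONDITION & SPEC =====
def Spec_schedule_courses_for_semester (courses : List String) (out : List (String × String × List String)) : Prop := out = schedule_courses_for_semester_alt courses
instance (courses : List String) (out : List (String × String × List String)) : Decidable (Spec_schedule_courses_for_semester courses out) := by unfold Spec_schedule_courses_for_semester; infer_instance

-- ===== CLAIM (what is proved, stated in full; the proofs are below) =====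
def Claim_equal_schedule_courses_for_semester : Prop := ∀ (courses : List String), Dom_schedule_courses_for_semester courses → Spec_schedule_courses_for_semester courses (schedule_courses_for_semester courses)

-- ===== LEMMAS AND PROOFS =====

-- the event stream: one ((day, slot), course) entry per grid append of A
def pvEvents (cs : List String) (n : Int) : List ((String × String) × String) :=
  (PySem.List.enumerate cs n).flatMap (fun p => (pvKeysOf p.1).map (fun k => (k, p.2)))

-- grouping step
def pvGStep (d : PySem.Dict (String × String) (List String)) (e : (String × String) × String) :
    PySem.Dict (String × String) (List String) :=
  d.modify e.1 [] (· ++ [e.2])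

def pvDayN (m : Nat) : String := PySem.List.pyGetD pvDAYS ((m : Nat) : Int) ""
def pvSlotN (m : Nat) : String := PySem.List.pyGetD pvTIME_SLOTS ((m : Nat) : Int) ""

theorem pv_keysOf_natCast (n : Nat) :
    pvKeysOf (n : Int) = [(pvDayN ((n / 2) % 5), pvSlotN (n % 2)),
                          (pvDayN ((n / 2 + 2) % 5), pvSlotN (n % 2))] := by
  simp [pvKeysOf, pvDayN, pvSlotN]

theorem pv_dayN_ne : ∀ x < 5, ∀ y < 5, x ≠ y → pvDayN x ≠ pvDayN y := by decide

theorem pv_keys_ne (n : Nat) :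
    (pvDayN ((n / 2) % 5), pvSlotN (n % 2)) ≠ (pvDayN ((n / 2 + 2) % 5), pvSlotN (n % 2)) := by
  intro h
  have h1 : pvDayN ((n / 2) % 5) = pvDayN ((n / 2 + 2) % 5) := congrArg Prod.fst h
  exact pv_dayN_ne _ (Nat.mod_lt _ (by omega)) _ (Nat.mod_lt _ (by omega)) (by omega) h1

theorem pv_events_cons (c : String) (cs : List String) (n : Int) :
    pvEvents (c :: cs) n = (pvKeysOf n).map (fun k => (k, c)) ++ pvEvents cs (n + 1) := by
  simp [pvEvents, PySem.List.enumerate_cons]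

-- A's stateful fold, started with pointers ((n+1)/2, n/2), groups exactly the event stream
theorem pv_main (cs : List String) : ∀ (n : Nat) (d : PySem.Dict (String × String) (List String)),
    ((PySem.List.enumerate cs (n : Int)).foldl pvStepA (d, ((n + 1) / 2 : Nat), ((n / 2 : Nat) : Int))).1
      = (pvEvents cs (n : Int)).foldl pvGStep d := by
  have hmod2 : ∀ m : Nat, PySem.Int.mod (m : Int) 2 = ((m % 2 : Nat) : Int) := fun m => by
    exact_mod_cast PySem.Int.mod_natCast m 2
  have hmod5 : ∀ m : Nat, PySem.Int.mod (m : Int) 5 = ((m % 5 : Nat) : Int) := fun m => by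
    exact_mod_cast PySem.Int.mod_natCast m 5
  induction cs with
  | nil => intro n d; simp [pvEvents, PySem.List.enumerate_nil]
  | cons c cs ih =>
    intro n d
    rw [PySem.List.enumerate_cons, pv_events_cons, List.foldl_cons, List.foldl_append,
      pv_keysOf_natCast n]
    simp only [List.map_cons, List.map_nil, List.foldl_cons, List.foldl_nil]
    have hc2 : (((n / 2 : Nat) : Int) + 2) = ((n / 2 + 2 : Nat) : Int) := by push_cast; ring
    have hstep : pvStepA (d, ((n + 1) / 2 : Nat), ((n / 2 : Nat) : Int)) ((n : Int), c)
        = (pvGStep (pvGStep d ((pvDayN ((n / 2) % 5), pvSlotN (n % 2)), c))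
            ((pvDayN ((n / 2 + 2) % 5), pvSlotN (n % 2)), c),
           (((n + 1 + 1) / 2 : Nat) : Int), (((n + 1) / 2 : Nat) : Int)) := by
      unfold pvStepA pvGStep pvDayN pvSlotN
      rcases Nat.even_or_odd n with he | ho
      · have hp : n % 2 = 0 := Nat.even_iff.mp he
        have e1 : (n + 1) / 2 = n / 2 := by omega
        have e2 : (n + 1 + 1) / 2 = n / 2 + 1 := by omega
        have e5 : (((n / 2 + 2) % 5 : Nat) : Int) ≠ ((n / 2 % 5 : Nat) : Int) := by
          exact_mod_cast (show (n / 2 + 2) % 5 ≠ n / 2 % 5 by omega)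
        simp only [hmod2, hp, Nat.cast_zero, beq_self_eq_true, if_true, e1,
          hc2, hmod5, if_neg e5, e2]
        push_cast
        ring_nf
      · have hp : n % 2 = 1 := Nat.odd_iff.mp ho
        have e1 : (n + 1 + 1) / 2 = (n + 1) / 2 := by omega
        have e3 : (n + 1) / 2 = n / 2 + 1 := by omega
        have e5 : (((n / 2 + 2) % 5 : Nat) : Int) ≠ ((n / 2 % 5 : Nat) : Int) := by
          exact_mod_cast (show (n / 2 + 2) % 5 ≠ n / 2 % 5 by omega)
        simp only [hmod2, hp, Nat.cast_one, e1, e3]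
        simp only [show ((1 : Int) == (0 : Int)) = false from rfl, Bool.false_eq_true, if_false]
        simp only [hc2, hmod5]
        rw [if_neg e5]
        push_cast
        ring_nf
    rw [hstep]
    have hn1 : ((n : Int) + 1) = ((n + 1 : Nat) : Int) := by push_cast; ring
    rw [hn1]
    exact ih (n + 1) _

-- the grouping fold's items, in closed form
theorem pv_items (es : List ((String × String) × String)) :
    (es.foldl pvGStep PySem.Dict.empty).items
      = (PySem.Set.ofList (es.map (·.1))).map
          (fun k => (k, (es.filter (fun p => p.1 == k)).map (·.2))) := by
  rw [show pvGStep = fun d p => d.modify p.1 [] (· ++ [p.2]) from rfl]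
  have hk : (es.foldl (fun d p => d.modify p.1 [] (· ++ [p.2])) PySem.Dict.empty).keys
      = PySem.Set.ofList (es.map (·.1)) := by
    rw [PySem.Dict.keys_foldl_modify_key]
    simp [PySem.Dict.keys_empty, PySem.Set.update_nil_left]
  have hnd : (es.foldl (fun d p => d.modify p.1 [] (· ++ [p.2])) PySem.Dict.empty).keys.Nodup := by
    rw [hk]; exact PySem.Set.nodup_ofList _
  rw [PySem.Dict.items_eq_map_keys _ hnd [], hk]
  apply List.map_congr_left
  intro k hkmem
  rw [PySem.Dict.getD_foldl_modify_append]
  simp [PySem.Dict.getD_empty]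

-- folding Set.add over a flatMap = the nested fold B's first loop performs
theorem pv_foldl_flatMap {α β : Type} [BEq α] (l : List β) (g : β → List α) :
    ∀ (s : PySem.Set α),
      (l.flatMap g).foldl PySem.Set.add s = l.foldl (fun s i => (g i).foldl PySem.Set.add s) s := by
  induction l with
  | nil => intro s; rfl
  | cons x xs ih => intro s; simp [List.flatMap_cons, List.foldl_append, ih]

-- the key stream of the events is what B's first loop dedups
theorem pv_keys_stream (cs : List String) :
    (pvEvents cs 0).map (·.1) = (PySem.List.pyRange 0 (cs.length : Int) 1).flatMap pvKeysOf := by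
  have h := PySem.List.map_fst_enumerate cs 0
  simp only [zero_add] at h
  rw [← h, List.flatMap_map]
  simp [pvEvents, List.map_flatMap, List.map_map, Function.comp_def]

-- per-cell: the membership filter over courses equals the key filter over the event stream
theorem pv_filter (cs : List String) (k : String × String) : ∀ (n : Nat),
    (((PySem.List.enumerate cs (n : Int)).filter (fun p => (pvKeysOf p.1).contains k)).map (·.2))
      = ((pvEvents cs (n : Int)).filter (fun p => p.1 == k)).map (·.2) := by
  induction cs with
  | nil => intro n; simp [pvEvents, PySem.List.enumerate_nil]
  | cons c cs ih =>
    intro n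
    have hcast : ((n : Int) + 1) = ((n + 1 : Nat) : Int) := by push_cast; ring
    have hne := pv_keys_ne n
    rw [pv_events_cons, PySem.List.enumerate_cons, List.filter_cons, List.filter_append,
      List.map_append, hcast, ← ih (n + 1), pv_keysOf_natCast n]
    by_cases h1 : k = (pvDayN ((n / 2) % 5), pvSlotN (n % 2))
    · subst h1
      simp [Ne.symm hne]
    · by_cases h2 : k = (pvDayN ((n / 2 + 2) % 5), pvSlotN (n % 2))
      · subst h2
        simp [h1, Ne.symm h1]
      · simp [h1, h2, Ne.symm h1, Ne.symm h2]

-- ===== VERDICT (by name: the statement is the Claim_ definition above) =====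
theorem schedule_courses_for_semester_spec : Claim_equal_schedule_courses_for_semester := by
  intro courses _
  unfold Spec_schedule_courses_for_semester schedule_courses_for_semester schedule_courses_for_semester_alt
  by_cases h : courses = []
  · simp [h]
  · simp only [if_neg h]
    -- A's side: stateful fold = event grouping, then its items in closed form
    have hA := pv_main courses 0 PySem.Dict.empty
    simp only [show (((0 : Nat) + 1) / 2 : Nat) = 0 from rfl, Nat.cast_zero] at hA
    rw [hA, pv_items]
    -- B's side: ordered = dedup of the event key stream
    have hord : (PySem.List.pyRange 0 (courses.length : Int) 1).foldl
        (fun s i => (pvKeysOf i).foldl PySem.Set.add s) PySem.Set.empty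
        = PySem.Set.ofList ((pvEvents courses 0).map (·.1)) := by
      rw [← pv_foldl_flatMap, pv_keys_stream]
      rfl
    rw [hord]
    -- B's grid: insert-fold over fresh distinct keys appends its items one by one
    rw [PySem.Dict.items_foldl_insert_fresh
      (PySem.Set.ofList ((pvEvents courses 0).map (·.1))) (fun k => k)
      (fun k => (((PySem.List.enumerate courses 0).filter
        (fun p => (pvKeysOf p.1).contains k)).map (·.2)))
      PySem.Dict.empty
      (fun a _ => PySem.Dict.contains_empty a)
      (by simp [PySem.Set.nodup_ofList])]
    simp only [show (PySem.Dict.empty : PySem.Dict (String × String) (List String)).items = [] from rfl,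
      List.nil_append, List.map_map]
    apply List.map_congr_left
    intro k _
    have hf := pv_filter courses k 0
    simp only [Nat.cast_zero] at hf
    simp only [Function.comp_apply]
    rw [← hf]
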